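-- pv_equiv track=rewrite | github.com/dzolotusky/advent-of-code | 2021/17/17.py | x_at_time
-- ===== SOURCE A (Python) =====
-- x_cache = {}
--
-- def x_at_time(t, x_velocity):
--     if (t, x_velocity) in x_cache:
--         return x_cache[(t, x_velocity)]
--
--     cur_x = 0
--     cur_velocity = x_velocity
--     for cur_t in range(t):
--         cur_x += cur_velocity
--         if cur_velocity < 0:
--             cur_velocity += 1
--         else:
--             if cur_velocity > 0:
--                 cur_velocity -= 1
--
--     x_cache[(t, x_velocity)] = cur_x
--     return cur_x
-- ===== SOURCE B (Python) =====
-- def x_at_time(t, x_velocity):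
--     # Closed-form: velocity decays toward 0, so x is a capped arithmetic series.
--     if t <= 0:
--         return 0
--     if x_velocity < 0:
--         s = min(t, -x_velocity)
--         return -(s * (-x_velocity) - s * (s - 1) // 2)
--     s = min(t, x_velocity)
--     return s * x_velocity - s * (s - 1) // 2
-- ===== Notes on version B (the rewrite author's own statement) =====
-- stated objective: faster
-- what changed: Replaces the step-by-step simulation loop over range(t) with a closed-form capped arithmetic-series formula (min(t,|v|) terms), O(1) instead of O(t).
import Mathlib
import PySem

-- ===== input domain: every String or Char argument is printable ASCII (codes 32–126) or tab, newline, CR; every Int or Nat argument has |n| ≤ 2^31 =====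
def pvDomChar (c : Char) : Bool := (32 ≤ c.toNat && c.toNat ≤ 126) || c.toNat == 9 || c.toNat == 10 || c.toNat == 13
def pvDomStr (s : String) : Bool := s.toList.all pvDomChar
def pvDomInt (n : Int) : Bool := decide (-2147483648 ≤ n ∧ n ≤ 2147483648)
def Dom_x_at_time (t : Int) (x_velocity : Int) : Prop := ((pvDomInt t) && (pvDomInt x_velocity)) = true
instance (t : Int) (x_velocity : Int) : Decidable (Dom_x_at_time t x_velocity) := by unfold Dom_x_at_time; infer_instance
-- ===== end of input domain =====

-- B replaces A's O(t) step-by-step velocity-decay loop by a closed-form capped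
-- arithmetic series (O(1)); the Python module's memo cache is pure memoization and
-- does not affect the returned value, so it is not part of the port.

-- ===== PORT A =====
-- one iteration of A's for-loop body: (cur_x, cur_velocity) update
def pvStepA (st : Int × Int) (_ : Int) : Int × Int :=
  (st.1 + st.2,
   if st.2 < 0 then st.2 + 1
   else if st.2 > 0 then st.2 - 1 else st.2)

def x_at_time (t : Int) (x_velocity : Int) : Int :=
  ((PySem.List.pyRange 0 t 1).foldl pvStepA (0, x_velocity)).1

-- ===== PORT B =====
def x_at_time_alt (t : Int) (x_velocity : Int) : Int :=
  if t ≤ 0 then 0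
  else if x_velocity < 0 then
    (let s := min t (-x_velocity);
     -(s * (-x_velocity) - PySem.Int.floordiv (s * (s - 1)) 2))
  else
    (let s := min t x_velocity;
     s * x_velocity - PySem.Int.floordiv (s * (s - 1)) 2)

-- ===== PRECONDITION & SPEC =====
def Spec_x_at_time (t : Int) (x_velocity : Int) (out : Int) : Prop := out = x_at_time_alt t x_velocity
instance (t : Int) (x_velocity : Int) (out : Int) : Decidable (Spec_x_at_time t x_velocity out) := by unfold Spec_x_at_time; infer_instance

-- ===== CLAIM (what is proved, stated in full; the proofs are below) =====
def Claim_equal_x_at_time : Prop := ∀ (t : Int) (x_velocity : Int), Dom_x_at_time t x_velocity → Spec_x_at_time t x_velocity (x_at_time t x_velocity)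

-- ===== LEMMAS AND PROOFS =====

-- closed-form position after n steps (no t ≤ 0 guard needed: s = 0 gives 0)
def pvX (n : Nat) (v : Int) : Int :=
  if v < 0 then
    -(min (n : Int) (-v) * (-v) - PySem.Int.floordiv (min (n : Int) (-v) * (min (n : Int) (-v) - 1)) 2)
  else
    min (n : Int) v * v - PySem.Int.floordiv (min (n : Int) v * (min (n : Int) v - 1)) 2

-- velocity after n steps
def pvV (n : Nat) (v : Int) : Int :=
  if v < 0 then min (v + n) 0 else max (v - n) 0

lemma pvFd2 (s : Int) : 2 * PySem.Int.floordiv (s * (s - 1)) 2 = s * (s - 1) := by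
  rw [PySem.Int.floordiv_eq_ediv_of_pos (by norm_num)]
  have he : Even (s * (s - 1)) := by
    have := Int.even_mul_succ_self (s - 1)
    simpa [mul_comm] using this
  obtain ⟨k, hk⟩ := he
  have : s * (s - 1) = 2 * k := by omega
  rw [this, Int.mul_ediv_cancel_left _ (by norm_num)]

lemma pvLoop (n : Nat) (v : Int) :
    (PySem.List.pyRange 0 (n : Int) 1).foldl pvStepA (0, v) = (pvX n v, pvV n v) := by
  induction n with
  | zero =>
    simp [PySem.List.pyRange_one_eq_nil (by norm_num : (0:Int) ≤ 0), pvX, pvV]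
    constructor
    · split_ifs with h
      · have h1 : min (0 : Int) (-v) = 0 := by omega
        rw [h1]; simp
      · have h1 : min (0 : Int) v = 0 := by omega
        rw [h1]; simp
    · split_ifs with h <;> omega
  | succ n ih =>
    have hcast : ((n + 1 : Nat) : Int) = (n : Int) + 1 := by push_cast; ring
    rw [hcast, PySem.List.pyRange_one_succ_right (by positivity), List.foldl_append, ih]
    simp only [List.foldl_cons, List.foldl_nil, pvStepA]
    rcases lt_or_ge v 0 with hv | hv
    · -- v < 0
      rcases lt_or_ge (n : Int) (-v) with hn | hn
      · -- still decaying: s goes n → n+1, velocity v + n < 0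
        have hVn : pvV n v = v + n := by simp [pvV, hv]; omega
        have hVn1 : pvV (n + 1) v = v + n + 1 := by simp [pvV, hv]; push_cast; omega
        have hs1 : min (n : Int) (-v) = (n : Int) := by omega
        have hs2 : min ((n : Int) + 1) (-v) = (n : Int) + 1 := by omega
        have hneg : pvV n v < 0 := by rw [hVn]; omega
        ext
        · simp only [hVn]
          simp only [pvX, if_pos hv, hs1]
          have hx1 : min (((n : Nat) + 1 : Nat) : Int) (-v) = (n : Int) + 1 := by
            push_cast; omega
          rw [show (((n : Nat) + 1 : Nat) : Int) = (n : Int) + 1 from by push_cast; ring] at hx1 ⊢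
          rw [hx1]
          have e1 := pvFd2 ((n : Int))
          have e2 := pvFd2 ((n : Int) + 1)
          have lk : ((n : Int) + 1) * (((n : Int) + 1) - 1) = (n : Int) * ((n : Int) - 1) + 2 * (n : Int) := by ring
          have lm : ((n : Int) + 1) * (-v) = (n : Int) * (-v) + (-v) := by ring
          linarith
        · simp only [pvV, if_pos hv]
          push_cast; split_ifs <;> omega
      · -- velocity exhausted: pvV n v = 0, nothing changes
        have hVn : pvV n v = 0 := by simp [pvV, hv]; omega
        have hs : min ((n : Int)) (-v) = -v := by omega
        have hs1 : min ((n : Int) + 1) (-v) = -v := by omega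
        ext
        · simp only [hVn]
          norm_num
          simp only [pvX, if_pos hv]
          rw [show (((n : Nat) + 1 : Nat) : Int) = (n : Int) + 1 from by push_cast; ring, hs, hs1]
        · simp only [hVn]
          norm_num [pvV, hv]
          push_cast; omega
    · -- 0 ≤ v
      rcases lt_or_ge (n : Int) v with hn | hn
      · have hVn : pvV n v = v - n := by simp [pvV]; omega
        have hpos : pvV n v > 0 := by rw [hVn]; omega
        have hnneg : ¬ pvV n v < 0 := by omega
        have hs1 : min (n : Int) v = (n : Int) := by omega
        ext
        · simp only [hVn]
          simp only [pvX, if_neg (by omega : ¬ v < 0), hs1]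
          have hx1 : min ((((n : Nat) + 1 : Nat)) : Int) v = (n : Int) + 1 := by
            push_cast; omega
          rw [hx1]
          have e1 := pvFd2 ((n : Int))
          have e2 := pvFd2 ((n : Int) + 1)
          have lk : ((n : Int) + 1) * (((n : Int) + 1) - 1) = (n : Int) * ((n : Int) - 1) + 2 * (n : Int) := by ring
          have lm : ((n : Int) + 1) * v = (n : Int) * v + v := by ring
          linarith
        · simp only [hVn]
          simp [pvV]
          push_cast; omega
      · have hVn : pvV n v = 0 := by simp [pvV]; omega
        ext
        · simp only [hVn]
          norm_num
          simp only [pvX, if_neg (by omega : ¬ v < 0)]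
          rw [show (((n : Nat) + 1 : Nat) : Int) = (n : Int) + 1 from by push_cast; ring,
              (by omega : min ((n : Int)) v = v), (by omega : min ((n : Int) + 1) v = v)]
        · simp only [hVn]
          norm_num [pvV, (by omega : ¬ v < 0)]
          push_cast; omega

-- ===== VERDICT (by name: the statement is the Claim_ definition above) =====
theorem x_at_time_spec : Claim_equal_x_at_time := by
  intro t v _
  unfold Spec_x_at_time x_at_time x_at_time_alt
  by_cases ht : t ≤ 0
  · rw [PySem.List.pyRange_one_eq_nil ht]
    simp [ht]
  · have hcast : t = ((t.toNat : Nat) : Int) := by omega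
    rw [hcast, pvLoop]
    simp only [pvX]
    rw [if_neg (by omega : ¬ ((t.toNat : Nat) : Int) ≤ 0)]
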